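-- pv_equiv track=rewrite | github.com/zaldis/Algo | Python/Strings/problems/cyclic_shift.py | solve
-- ===== SOURCE A (Python) =====
-- from typing import List
--
-- def get_zfunc(text: str) -> List[int]:
--     n = len(text)
--     l = r = 0
--     z = [0] * n
--
--     for i in range(1, n):
--         if i < r:
--             z[i] = min(z[i-l], r-i+1)
--         while i+z[i] < n and text[z[i]] == text[i+z[i]]:
--             z[i] += 1
--         if i+z[i]-1 > r:
--             l = i
--             r = i+z[i]-1
--     return z
--
-- def is_cyclic(text: str, pattern: str) -> bool:
--     """
--         Check if pattern can be represented by cyclic shift to text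
--     """
--     zfunc = get_zfunc(pattern + '~' + text + text)
--     return len(pattern) in zfunc
--
-- def solve(text, pattern) -> int:
--     cyclic_substrs = 0
--     for i in range(len(text)-len(pattern)+1):
--         start = i
--         end = i + len(pattern)
--         target_substr = text[start:end]
--         if is_cyclic(target_substr, pattern):
--             cyclic_substrs += 1
--     return cyclic_substrs
-- ===== SOURCE B (Python) =====
-- def z_naive(s):
--     n = len(s)
--     z = [0] * n
--     for j in range(1, n):
--         while j + z[j] < n and s[z[j]] == s[j + z[j]]:
--             z[j] += 1
--     return z
--
--
-- def solve(text, pattern) -> int: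
--     m = len(pattern)
--     return sum(m in z_naive(pattern + '~' + text[i:i + m] * 2)
--                for i in range(len(text) - m + 1))
-- ===== Notes on version B (the rewrite author's own statement) =====
-- stated objective: simpler
-- what changed: A computes each window's Z-array with the linear two-pointer (l,r) algorithm split over helper functions; B inlines a naive Z-array that rescans the prefix match from zero at every position and folds the counting into a single sum over windows.
import Mathlib
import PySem

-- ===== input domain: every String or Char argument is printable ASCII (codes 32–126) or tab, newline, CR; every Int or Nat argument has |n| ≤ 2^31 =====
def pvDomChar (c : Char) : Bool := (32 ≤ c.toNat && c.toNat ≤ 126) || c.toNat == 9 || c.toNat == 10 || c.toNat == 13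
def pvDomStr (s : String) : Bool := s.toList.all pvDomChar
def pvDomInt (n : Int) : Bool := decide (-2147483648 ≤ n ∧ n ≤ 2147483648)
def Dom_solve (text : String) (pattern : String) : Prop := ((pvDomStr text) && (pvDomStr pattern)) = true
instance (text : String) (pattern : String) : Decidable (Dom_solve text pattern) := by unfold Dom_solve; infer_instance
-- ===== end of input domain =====

-- B replaces A's two-pointer (l,r) Z-function, split over helpers, by a naive Z-array computed by
-- rescanning the prefix match from zero at each position, summed over the windows; objective: simpler.

-- ===== PORT A =====
-- while i+z[i] < n and text[z[i]] == text[i+z[i]]: z[i] += 1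
def zwhile (s : List Char) (n i zi : Nat) : Nat :=
  if i + zi < n ∧ s.getD zi ' ' = s.getD (i + zi) ' ' then
    zwhile s n i (zi + 1)
  else zi
termination_by n - (i + zi)
decreasing_by omega

-- one iteration of get_zfunc's for-loop; state = (l, r, z)
def zstep (s : List Char) (n : Nat) (st : Nat × Nat × List Nat) (i : Nat) : Nat × Nat × List Nat :=
  let l := st.1
  let r := st.2.1
  let z := st.2.2
  let z1 := if i < r then z.set i (min (z.getD (i - l) 0) (r - i + 1)) else z
  let zi := zwhile s n i (z1.getD i 0)
  let z2 := z1.set i zi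
  if i + zi - 1 > r then (i, i + zi - 1, z2) else (l, r, z2)

def get_zfunc (s : List Char) : List Nat :=
  ((List.range' 1 (s.length - 1)).foldl (zstep s s.length) (0, 0, List.replicate s.length 0)).2.2

-- len(pattern) in get_zfunc(pattern + '~' + text + text)
def is_cyclic (w : List Char) (pat : List Char) : Bool :=
  (get_zfunc (pat ++ '~' :: (w ++ w))).contains pat.length

def solveA (text pattern : List Char) : Int :=
  (PySem.List.pyRange 0 ((text.length : Int) - pattern.length + 1) 1).foldl
    (fun acc i =>
      let w := PySem.List.slice text (some i) (some (i + pattern.length))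
      if is_cyclic w pattern then acc + 1 else acc) 0

def solve (text pattern : String) : Int := solveA text.toList pattern.toList

-- ===== PORT B =====
-- while j + z[j] < n and s[z[j]] == s[j + z[j]]: z[j] += 1
def matchlen (s : List Char) (n j k : Nat) : Nat :=
  if j + k < n ∧ s.getD k ' ' = s.getD (j + k) ' ' then
    matchlen s n j (k + 1)
  else k
termination_by n - (j + k)
decreasing_by omega

def z_naive (s : List Char) : List Nat :=
  (List.range' 1 (s.length - 1)).foldl
    (fun z j => z.set j (matchlen s s.length j (z.getD j 0)))
    (List.replicate s.length 0)

-- sum(m in z_naive(pattern + '~' + text[i:i+m]*2) for i in range(len(text)-m+1))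
def solveB (text pattern : List Char) : Int :=
  let m := pattern.length
  (PySem.List.pyRange 0 ((text.length : Int) - (m : Int) + 1) 1).foldl
    (fun acc i =>
      let w := PySem.List.slice text (some i) (some (i + (m : Int)))
      acc + (if (z_naive (pattern ++ '~' :: (w ++ w))).contains m then 1 else 0)) 0

def solve_alt (text pattern : String) : Int := solveB text.toList pattern.toList

-- ===== PRECONDITION & SPEC =====
def Spec_solve (text : String) (pattern : String) (out : Int) : Prop := out = solve_alt text pattern
instance (text : String) (pattern : String) (out : Int) : Decidable (Spec_solve text pattern out) := by unfold Spec_solve; infer_instance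

-- ===== CLAIM (what is proved, stated in full; the proofs are below) =====
def Claim_equal_solve : Prop := ∀ (text : String) (pattern : String), Dom_solve text pattern → Spec_solve text pattern (solve text pattern)

-- ===== LEMMAS AND PROOFS =====

-- longest common prefix of two lists
def lcp : List Char → List Char → Nat
  | a :: as, b :: bs => if a = b then lcp as bs + 1 else 0
  | _, _ => 0

theorem lcp_le_right (xs ys : List Char) : lcp xs ys ≤ ys.length := by
  induction xs generalizing ys with
  | nil => simp [lcp]
  | cons a as ih =>
    cases ys with
    | nil => simp [lcp]
    | cons b bs =>
      simp only [lcp, List.length_cons]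
      split
      · exact Nat.succ_le_succ (ih bs)
      · omega

theorem le_lcp_iff (xs ys : List Char) (k : Nat) :
    k ≤ lcp xs ys ↔ k ≤ xs.length ∧ k ≤ ys.length ∧ xs.take k = ys.take k := by
  induction xs generalizing ys k with
  | nil =>
    simp only [lcp, List.length_nil, List.take_nil]
    constructor
    · intro h
      have : k = 0 := Nat.le_zero.mp h
      subst this; simp
    · rintro ⟨h, -, -⟩; exact h
  | cons a as ih =>
    cases ys with
    | nil =>
      simp only [lcp, List.length_nil, List.take_nil]
      constructor
      · intro h
        have : k = 0 := Nat.le_zero.mp h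
        subst this; simp
      · rintro ⟨-, h, -⟩; exact h
    | cons b bs =>
      cases k with
      | zero => simp
      | succ j =>
        simp only [lcp, List.length_cons, List.take_succ_cons]
        by_cases hab : a = b
        · subst hab
          simp only [if_true, List.cons.injEq, true_and,
            Nat.add_le_add_iff_right, ih]
        · simp only [if_neg hab]
          constructor
          · omega
          · rintro ⟨-, -, h⟩
            exact absurd (by injection h) hab

-- invariant of get_zfunc's main loop: z holds the true z-values below i, and [l, r] is a prefix-matching window
def ZInv (s : List Char) (i : Nat) (st : Nat × Nat × List Nat) : Prop :=
  st.2.2.length = s.length ∧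
  (∀ j, st.2.2.getD j 0 = if 1 ≤ j ∧ j < i then lcp s (s.drop j) else 0) ∧
  ((st.1 = 0 ∧ st.2.1 = 0) ∨
    (1 ≤ st.1 ∧ st.1 < i ∧ st.1 ≤ st.2.1 + 1 ∧ st.2.1 < s.length ∧
      (s.drop st.1).take (st.2.1 + 1 - st.1) = s.take (st.2.1 + 1 - st.1)))

-- prefix equality transfers to element equality
theorem take_eq_get (A B : List Char) (n q : Nat) (h : A.take n = B.take n) (hq : q < n) :
    A[q]? = B[q]? := by
  have := congrArg (fun t => t[q]?) h
  simpa [List.getElem?_take_of_lt hq] using this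

theorem zwhile_eq (s : List Char) (i zi : Nat) (hi : 1 ≤ i)
    (hm : (s.drop i).take zi = s.take zi) (hle : i + zi ≤ s.length) :
    zwhile s s.length i zi = lcp s (s.drop i) := by
  rw [zwhile]
  split
  · rename_i h
    obtain ⟨h1, h2⟩ := h
    refine zwhile_eq s i (zi + 1) hi ?_ (by omega)
    have hzi : zi < s.length := by omega
    have hd : (s.drop i)[zi]? = s[i + zi]? := by
      rw [List.getElem?_drop]
    have he : s[zi]? = s[i + zi]? := by
      rw [List.getElem?_eq_getElem hzi, List.getElem?_eq_getElem h1]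
      have := h2
      rwa [List.getD_eq_getElem?_getD, List.getD_eq_getElem?_getD,
        List.getElem?_eq_getElem hzi, List.getElem?_eq_getElem h1,
        Option.getD_some, Option.getD_some, ← Option.some_inj] at this
    rw [List.take_add_one, List.take_add_one, hm, hd, ← he]
  · rename_i h
    have hzs : zi ≤ s.length := by omega
    have hzd : zi ≤ (s.drop i).length := by simp [List.length_drop]; omega
    have hge : zi ≤ lcp s (s.drop i) :=
      (le_lcp_iff _ _ _).mpr ⟨hzs, hzd, hm.symm⟩
    have hlt : ¬ (zi + 1 ≤ lcp s (s.drop i)) := by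
      intro hcon
      obtain ⟨ha, hb, hc⟩ := (le_lcp_iff _ _ _).mp hcon
      rw [List.length_drop] at hb
      have h1 : i + zi < s.length := by omega
      apply h
      refine ⟨h1, ?_⟩
      rw [List.take_add_one, List.take_add_one, hm.symm] at hc
      have := List.append_cancel_left hc
      rw [List.getElem?_drop] at this
      rw [List.getElem?_eq_getElem (by omega), List.getElem?_eq_getElem h1] at this
      simp only [Option.toList_some, List.cons.injEq] at this
      rw [List.getD_eq_getElem?_getD, List.getD_eq_getElem?_getD,
        List.getElem?_eq_getElem (by omega : zi < s.length), List.getElem?_eq_getElem h1]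
      simpa using this.1
    omega
termination_by s.length - (i + zi)

theorem zstep_inv (s : List Char) (i : Nat) (st : Nat × Nat × List Nat)
    (h : ZInv s i st) (hi : 1 ≤ i) (hn : i < s.length) :
    ZInv s (i + 1) (zstep s s.length st i) := by
  obtain ⟨l, r, z⟩ := st
  obtain ⟨hlen, hz, hlr⟩ := h
  simp only at hlen hz hlr
  set z1 := if i < r then z.set i (min (z.getD (i - l) 0) (r - i + 1)) else z with hz1
  have hlen1 : z1.length = s.length := by
    rw [hz1]; split <;> simp [hlen]
  -- the start value of the while loop is a valid partial match
  have hstart : (s.drop i).take (z1.getD i 0) = s.take (z1.getD i 0) ∧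
      i + z1.getD i 0 ≤ s.length := by
    rw [hz1]
    split
    · rename_i hir
      -- i < r: the saved window [l, r] matches the prefix
      rcases hlr with ⟨hl0, hr0⟩ | ⟨hl1, hli, hlr1, hrn, hblock⟩
      · omega
      have hset : (z.set i (min (z.getD (i - l) 0) (r - i + 1))).getD i 0
          = min (z.getD (i - l) 0) (r - i + 1) := by
        rw [List.getD_eq_getElem?_getD, List.getElem?_set_self (by omega : i < z.length)]
        rfl
      rw [hset]
      have hv : z.getD (i - l) 0 = lcp s (s.drop (i - l)) := by
        rw [hz (i - l)]
        simp only [if_pos (by omega : 1 ≤ i - l ∧ i - l < i)]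
      set w0 := min (z.getD (i - l) 0) (r - i + 1) with hw0
      have hw0v : w0 ≤ lcp s (s.drop (i - l)) := by rw [← hv]; omega
      have hw0r : w0 ≤ r - i + 1 := by omega
      have htkv : s.take w0 = (s.drop (i - l)).take w0 :=
        ((le_lcp_iff _ _ _).mp hw0v).2.2
      constructor
      · apply List.ext_getElem?
        intro q
        by_cases hq : q < w0
        · rw [List.getElem?_take_of_lt hq, List.getElem?_take_of_lt hq,
            List.getElem?_drop]
          -- s[i+q] = s[(i-l)+q] by the window match, = s[q] by z[i-l]
          have e1 : s[q]? = (s.drop (i - l))[q]? := take_eq_get _ _ w0 q htkv hq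
          rw [List.getElem?_drop] at e1
          have e2 : (s.drop l)[i - l + q]? = s[i - l + q]? := by
            apply take_eq_get _ _ (r + 1 - l) _ hblock
            omega
          rw [List.getElem?_drop] at e2
          have : l + (i - l + q) = i + q := by omega
          rw [this] at e2
          rw [e2, ← e1]
        · have h1 : ((s.drop i).take w0).length ≤ q := by
            simp [List.length_take]; omega
          have h2 : (s.take w0).length ≤ q := by
            simp [List.length_take]; omega
          rw [List.getElem?_eq_none_iff.mpr h1, List.getElem?_eq_none_iff.mpr h2]
      · omega
    · rename_i hir
      have : z.getD i 0 = 0 := by rw [hz i]; simp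
      rw [this]
      simp [List.take_zero]; omega
  set zi := zwhile s s.length i (z1.getD i 0) with hzi
  have hziL : zi = lcp s (s.drop i) := zwhile_eq s i _ hi hstart.1 hstart.2
  have hzile : i + zi ≤ s.length := by
    have := lcp_le_right s (s.drop i)
    rw [List.length_drop] at this
    omega
  -- the updated z array
  have hz2 : ∀ j, (z1.set i zi).getD j 0 =
      if 1 ≤ j ∧ j < i + 1 then lcp s (s.drop j) else 0 := by
    intro j
    by_cases hji : j = i
    · subst hji
      rw [List.getD_eq_getElem?_getD, List.getElem?_set_self (by omega : j < z1.length)]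
      simp only [Option.getD_some, hziL]
      rw [if_pos ⟨hi, by omega⟩]
    · rw [List.getD_eq_getElem?_getD, List.getElem?_set_ne (by omega : i ≠ j),
        ← List.getD_eq_getElem?_getD]
      have hj1 : z1.getD j 0 = z.getD j 0 := by
        rw [hz1]; split
        · rw [List.getD_eq_getElem?_getD, List.getElem?_set_ne (by omega : i ≠ j),
            ← List.getD_eq_getElem?_getD]
        · rfl
      rw [hj1, hz j]
      by_cases hc : 1 ≤ j ∧ j < i
      · rw [if_pos hc, if_pos ⟨hc.1, by omega⟩]
      · rw [if_neg hc, if_neg (by omega)]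
  have hlen2 : (z1.set i zi).length = s.length := by simp [hlen1]
  -- assemble
  have hstep : zstep s s.length (l, r, z) i =
      if i + zi - 1 > r then (i, i + zi - 1, z1.set i zi) else (l, r, z1.set i zi) := rfl
  rw [hstep]
  by_cases hgt : i + zi - 1 > r
  · rw [if_pos hgt]
    unfold ZInv
    simp only
    refine ⟨hlen2, hz2, Or.inr ⟨hi, by omega, by omega, by omega, ?_⟩⟩
    -- new window [i, i+zi-1] matches the prefix
    have hk : i + zi - 1 + 1 - i ≤ zi := by omega
    have htz : s.take zi = (s.drop i).take zi :=
      ((le_lcp_iff _ _ _).mp (le_of_eq hziL)).2.2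
    calc (s.drop i).take (i + zi - 1 + 1 - i)
        = ((s.drop i).take zi).take (i + zi - 1 + 1 - i) := by
          rw [List.take_take]; simp [Nat.min_eq_left hk]
      _ = (s.take zi).take (i + zi - 1 + 1 - i) := by rw [htz]
      _ = s.take (i + zi - 1 + 1 - i) := by
          rw [List.take_take]; simp [Nat.min_eq_left hk]
  · rw [if_neg hgt]
    unfold ZInv
    simp only
    refine ⟨hlen2, hz2, ?_⟩
    rcases hlr with h1 | h2
    · exact Or.inl h1
    · exact Or.inr ⟨h2.1, by omega, h2.2.2.1, h2.2.2.2.1, h2.2.2.2.2⟩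

theorem zloop_inv (s : List Char) (cnt : Nat) : ∀ (i : Nat) (st : Nat × Nat × List Nat),
    ZInv s i st → 1 ≤ i → i + cnt ≤ s.length →
    ZInv s (i + cnt) ((List.range' i cnt).foldl (zstep s s.length) st) := by
  induction cnt with
  | zero => intro i st h _ _; simpa using h
  | succ c ih =>
    intro i st h hi hle
    rw [List.range'_succ, List.foldl_cons]
    have := ih (i + 1) (zstep s s.length st i) (zstep_inv s i st h hi (by omega)) (by omega) (by omega)
    have harith : i + 1 + c = i + (c + 1) := by omega
    rwa [harith] at this

theorem get_zfunc_spec (s : List Char) (hs : 1 ≤ s.length) :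
    (get_zfunc s).length = s.length ∧
    ∀ j, (get_zfunc s).getD j 0 = if 1 ≤ j ∧ j < s.length then lcp s (s.drop j) else 0 := by
  have h0 : ZInv s 1 (0, 0, List.replicate s.length 0) := by
    refine ⟨by simp, ?_, Or.inl ⟨rfl, rfl⟩⟩
    intro j
    rw [if_neg (by omega)]
    rw [List.getD_eq_getElem?_getD]
    rcases Nat.lt_or_ge j s.length with h | h
    · simp [h]
    · rw [List.getElem?_eq_none_iff.mpr (by simpa using h)]; rfl
  have := zloop_inv s (s.length - 1) 1 _ h0 (le_refl 1) (by omega)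
  have harith : 1 + (s.length - 1) = s.length := by omega
  rw [harith] at this
  exact ⟨this.1, this.2.1⟩

-- B's inner while-loop is the same recurrence as A's, so it computes the same match length
theorem matchlen_eq_zwhile (s : List Char) (n j k : Nat) :
    matchlen s n j k = zwhile s n j k := by
  rw [matchlen, zwhile]
  split
  · exact matchlen_eq_zwhile s n j (k + 1)
  · rfl
termination_by n - (j + k)
decreasing_by omega

-- invariant of z_naive's loop
def BInv (s : List Char) (i : Nat) (z : List Nat) : Prop :=
  z.length = s.length ∧
  ∀ j, z.getD j 0 = if 1 ≤ j ∧ j < i then lcp s (s.drop j) else 0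

theorem bstep_inv (s : List Char) (i : Nat) (z : List Nat)
    (h : BInv s i z) (hi : 1 ≤ i) (hn : i < s.length) :
    BInv s (i + 1) (z.set i (matchlen s s.length i (z.getD i 0))) := by
  obtain ⟨hlen, hz⟩ := h
  have hz0 : z.getD i 0 = 0 := by rw [hz i]; simp
  have hml : matchlen s s.length i (z.getD i 0) = lcp s (s.drop i) := by
    rw [hz0, matchlen_eq_zwhile]
    exact zwhile_eq s i 0 hi (by simp) (by omega)
  refine ⟨by simp [hlen], ?_⟩
  intro j
  by_cases hji : j = i
  · subst hji
    rw [List.getD_eq_getElem?_getD, List.getElem?_set_self (by omega : j < z.length)]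
    simp only [Option.getD_some, hml]
    rw [if_pos ⟨hi, by omega⟩]
  · rw [List.getD_eq_getElem?_getD, List.getElem?_set_ne (by omega : i ≠ j),
      ← List.getD_eq_getElem?_getD, hz j]
    by_cases hc : 1 ≤ j ∧ j < i
    · rw [if_pos hc, if_pos ⟨hc.1, by omega⟩]
    · rw [if_neg hc, if_neg (by omega)]

theorem bloop_inv (s : List Char) (cnt : Nat) : ∀ (i : Nat) (z : List Nat),
    BInv s i z → 1 ≤ i → i + cnt ≤ s.length →
    BInv s (i + cnt)
      ((List.range' i cnt).foldl (fun z j => z.set j (matchlen s s.length j (z.getD j 0))) z) := by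
  induction cnt with
  | zero => intro i z h _ _; simpa using h
  | succ c ih =>
    intro i z h hi hle
    rw [List.range'_succ, List.foldl_cons]
    have := ih (i + 1) _ (bstep_inv s i z h hi (by omega)) (by omega) (by omega)
    have harith : i + 1 + c = i + (c + 1) := by omega
    rwa [harith] at this

theorem z_naive_spec (s : List Char) (hs : 1 ≤ s.length) :
    (z_naive s).length = s.length ∧
    ∀ j, (z_naive s).getD j 0 = if 1 ≤ j ∧ j < s.length then lcp s (s.drop j) else 0 := by
  have h0 : BInv s 1 (List.replicate s.length 0) := by
    refine ⟨by simp, ?_⟩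
    intro j
    rw [if_neg (by omega)]
    rw [List.getD_eq_getElem?_getD]
    rcases Nat.lt_or_ge j s.length with h | h
    · simp [h]
    · rw [List.getElem?_eq_none_iff.mpr (by simpa using h)]; rfl
  have := bloop_inv s (s.length - 1) 1 _ h0 (le_refl 1) (by omega)
  have harith : 1 + (s.length - 1) = s.length := by omega
  rw [harith] at this
  exact this

-- both Z computations produce the same list
theorem zlists_eq (s : List Char) (hs : 1 ≤ s.length) : get_zfunc s = z_naive s := by
  obtain ⟨l1, h1⟩ := get_zfunc_spec s hs
  obtain ⟨l2, h2⟩ := z_naive_spec s hs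
  apply List.ext_getElem (by rw [l1, l2])
  intro j hj1 hj2
  have := (h1 j).trans (h2 j).symm
  rwa [List.getD_eq_getElem _ 0 hj1, List.getD_eq_getElem _ 0 hj2] at this

theorem solveAB (text pattern : List Char) : solveA text pattern = solveB text pattern := by
  simp only [solveA, solveB]
  apply PySem.List.foldl_congr_mem
  intro acc x hx
  have hs : 1 ≤ (pattern ++ '~' :: (PySem.List.slice text (some x) (some (x + pattern.length)) ++
      PySem.List.slice text (some x) (some (x + pattern.length)))).length := by
    simp; omega
  rw [is_cyclic, zlists_eq _ hs]
  split <;> simp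

-- ===== VERDICT (by name: the statement is the Claim_ definition above) =====
theorem solve_spec : Claim_equal_solve := by
  intro text pattern _
  unfold Spec_solve
  show solveA _ _ = _
  exact solveAB _ _
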